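-- pv_equiv track=rewrite | github.com/geekypandey/aoc2015 | day03/part2.py | compute
-- ===== SOURCE A (Python) =====
-- def compute(s: str) -> int:
--     santas_pos = [(0,0), (0,0)]
--     visited = set()
--     visited.add(santas_pos[0])
--     visited.add(santas_pos[1])
--     start = 0
--     for m in s:
--         pos = santas_pos[start]
--         if m == '>':
--             pos = (pos[0]+1, pos[1])
--         elif m == '<':
--             pos = (pos[0]-1, pos[1])
--         elif m == '^':
--             pos = (pos[0], pos[1]-1)
--         elif m == 'v':
--             pos = (pos[0], pos[1]+1)
--         if pos not in visited:
--             visited.add(pos)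
--         santas_pos[start] = pos
--         if start == 1:
--             start = 0
--         elif start == 0:
--             start = 1
--     return len(visited)
-- ===== SOURCE B (Python) =====
-- def compute(s: str) -> int:
--     visited = {(0, 0)}
--     for t in (s[::2], s[1::2]):
--         x = y = 0
--         for m in t:
--             if m == '>':
--                 x += 1
--             elif m == '<':
--                 x -= 1
--             elif m == '^':
--                 y -= 1
--             elif m == 'v':
--                 y += 1
--             visited.add((x, y))
--     return len(visited)
-- ===== Notes on version B (the rewrite author's own statement) =====
-- stated objective: simpler
-- what changed: Replaces A's single interleaved loop with a two-slot position list and alternating turn counter by two independent linear walks over the slices s[::2] and s[1::2] into one shared visited set.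
import Mathlib
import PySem

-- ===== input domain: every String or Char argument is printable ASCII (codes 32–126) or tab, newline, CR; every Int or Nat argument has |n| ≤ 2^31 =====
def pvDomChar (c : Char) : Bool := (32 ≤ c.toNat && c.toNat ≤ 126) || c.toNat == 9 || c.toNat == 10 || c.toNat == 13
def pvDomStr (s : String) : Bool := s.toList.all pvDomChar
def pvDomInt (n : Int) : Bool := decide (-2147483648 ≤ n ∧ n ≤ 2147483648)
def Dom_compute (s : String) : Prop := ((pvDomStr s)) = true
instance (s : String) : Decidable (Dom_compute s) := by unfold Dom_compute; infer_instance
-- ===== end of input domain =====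

-- B replaces A's single interleaved loop with alternating-santa state by two independent
-- walks over the slices s[::2] and s[1::2] into a shared visited set;
-- objective: simpler (no alternating turn/state bookkeeping), same asymptotic cost.

-- ===== PORT A =====
-- one loop step of A: state = (santas_pos, visited, start)
def stepA (st : List (Int × Int) × PySem.Set (Int × Int) × Int) (m : Char) :
    List (Int × Int) × PySem.Set (Int × Int) × Int :=
  let santas := st.1
  let visited := st.2.1
  let start := st.2.2
  let pos := PySem.List.pyGetD santas start ((0 : Int), (0 : Int))
  let pos :=
    if m = '>' then (pos.1 + 1, pos.2)
    else if m = '<' then (pos.1 - 1, pos.2)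
    else if m = '^' then (pos.1, pos.2 - 1)
    else if m = 'v' then (pos.1, pos.2 + 1)
    else pos
  let visited := if ¬ (PySem.Set.contains visited pos = true) then PySem.Set.add visited pos else visited
  let santas := PySem.List.pySetD santas start pos
  let start : Int := if start = 1 then 0 else if start = 0 then 1 else start
  (santas, visited, start)

def compute (s : String) : Int :=
  let santas : List (Int × Int) := [(0, 0), (0, 0)]
  let visited : PySem.Set (Int × Int) := PySem.Set.empty
  let visited := PySem.Set.add visited (PySem.List.pyGetD santas 0 ((0 : Int), (0 : Int)))
  let visited := PySem.Set.add visited (PySem.List.pyGetD santas 1 ((0 : Int), (0 : Int)))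
  let st := s.toList.foldl stepA (santas, visited, 0)
  PySem.Set.len st.2.1

-- ===== PORT B =====
-- the arrow-to-delta move of Source B's if/elif chain
def moveB (m : Char) (x y : Int) : Int × Int :=
  if m = '>' then (x + 1, y)
  else if m = '<' then (x - 1, y)
  else if m = '^' then (x, y - 1)
  else if m = 'v' then (x, y + 1)
  else (x, y)

-- s[::2]: every second element from index 0 (hand port of the step-2 slice; exact: start 0,
-- no stop, step 2 over the whole list takes elements 0,2,4,…)
def everyOther (t : List Char) : List Char :=
  match t with
  | [] => []
  | c :: rest => c :: everyOther rest.tail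
termination_by t.length
decreasing_by simp [List.length_tail]

-- one step of Source B's inner 'for m in t' loop; state = (x, y, visited)
def stepB (st : Int × Int × PySem.Set (Int × Int)) (m : Char) :
    Int × Int × PySem.Set (Int × Int) :=
  let p := moveB m st.1 st.2.1
  (p.1, p.2, PySem.Set.add st.2.2 p)

def compute_alt (s : String) : Int :=
  let v0 : PySem.Set (Int × Int) := PySem.Set.ofList [((0 : Int), (0 : Int))]
  let v1 := ((everyOther s.toList).foldl stepB (0, 0, v0)).2.2          -- t = s[::2]
  let v2 := ((everyOther s.toList.tail).foldl stepB (0, 0, v1)).2.2     -- t = s[1::2]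
  PySem.Set.len v2

-- ===== PRECONDITION & SPEC =====
def Spec_compute (s : String) (out : Int) : Prop := out = compute_alt s
instance (s : String) (out : Int) : Decidable (Spec_compute s out) := by unfold Spec_compute; infer_instance

-- ===== CLAIM (what is proved, stated in full; the proofs are below) =====
def Claim_equal_compute : Prop := ∀ (s : String), Dom_compute s → Spec_compute s (compute s)

-- ===== LEMMAS AND PROOFS =====

-- proof-only: the two-characters-at-a-time walk both ports flatten to
def walkB (t : List Char) (x y : Int) (v : PySem.Set (Int × Int)) : PySem.Set (Int × Int) :=
  match t with
  | [] => v
  | m :: rest =>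
    let p := moveB m x y
    walkB rest.tail p.1 p.2 (PySem.Set.add v p)
termination_by t.length
decreasing_by simp [List.length_tail]

lemma foldB_eq_walkB (t : List Char) (x y : Int) (v : PySem.Set (Int × Int)) :
    ((everyOther t).foldl stepB (x, y, v)).2.2 = walkB t x y v := by
  induction t, x, y, v using walkB.induct with
  | case1 => simp [everyOther, walkB]
  | case2 x y v m rest _p ih =>
    rw [everyOther, walkB]
    simp only [List.foldl, stepB]
    exact ih

-- positions visited by one walk of walkB (proof-only helper)
def trajB (t : List Char) (x y : Int) : List (Int × Int) :=
  match t with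
  | [] => []
  | m :: rest =>
    let p := moveB m x y
    p :: trajB rest.tail p.1 p.2
termination_by t.length
decreasing_by simp [List.length_tail]

lemma condAdd (v : PySem.Set (Int × Int)) (p : Int × Int) :
    (if ¬ (PySem.Set.contains v p = true) then PySem.Set.add v p else v) = PySem.Set.add v p := by
  by_cases h : p ∈ v
  · rw [if_neg (by simpa using h), PySem.Set.add_of_mem h]
  · rw [if_pos (by simpa using h)]

lemma stepA_zero (p q : Int × Int) (V : PySem.Set (Int × Int)) (m : Char) :
    stepA ([p, q], V, 0) m = ([moveB m p.1 p.2, q], PySem.Set.add V (moveB m p.1 p.2), 1) := by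
  unfold stepA
  simp only [condAdd]
  simp [moveB, PySem.List.pyGetD, PySem.List.pySetD, PySem.List.pySet?, PySem.List.pyIdx?]

lemma stepA_one (p q : Int × Int) (V : PySem.Set (Int × Int)) (m : Char) :
    stepA ([p, q], V, 1) m = ([p, moveB m q.1 q.2], PySem.Set.add V (moveB m q.1 q.2), 0) := by
  unfold stepA
  simp only [condAdd]
  simp [moveB, PySem.List.pyGetD, PySem.List.pySetD, PySem.List.pySet?, PySem.List.pyIdx?]

lemma mem_walkB (t : List Char) (x y : Int) (v : PySem.Set (Int × Int)) (z : Int × Int) :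
    z ∈ walkB t x y v ↔ z ∈ v ∨ z ∈ trajB t x y := by
  induction t, x, y, v using walkB.induct with
  | case1 => simp [walkB, trajB]
  | case2 x y v m rest _p ih =>
    simp only [walkB, trajB]
    rw [ih]
    simp [PySem.Set.mem_add]
    tauto

lemma nodup_walkB (t : List Char) (x y : Int) (v : PySem.Set (Int × Int)) (h : v.Nodup) :
    (walkB t x y v).Nodup := by
  induction t, x, y, v using walkB.induct with
  | case1 => simpa [walkB]
  | case2 x y v m rest _p ih =>
    rw [walkB]
    exact ih (PySem.Set.nodup_add _ _ h)

lemma foldA_mem : (l : List Char) → ∀ (p q : Int × Int) (V : PySem.Set (Int × Int)) (z : Int × Int),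
    (z ∈ (l.foldl stepA ([p, q], V, 0)).2.1 ↔
      z ∈ V ∨ z ∈ trajB l p.1 p.2 ∨ z ∈ trajB l.tail q.1 q.2)
  | [] => by intro p q V z; simp only [List.foldl, List.tail]; simp [trajB]
  | [a] => by
    intro p q V z
    simp only [List.foldl, stepA_zero, List.tail]
    simp [trajB, PySem.Set.mem_add]
  | a :: b :: r => by
    intro p q V z
    have ih := foldA_mem r (moveB a p.1 p.2) (moveB b q.1 q.2)
      (PySem.Set.add (PySem.Set.add V (moveB a p.1 p.2)) (moveB b q.1 q.2)) z
    simp only [List.foldl, stepA_zero, stepA_one, List.tail] at *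
    rw [ih]
    simp only [trajB]
    simp [PySem.Set.mem_add, List.tail]
    tauto

lemma foldA_nodup (l : List Char) :
    ∀ (st : List (Int × Int) × PySem.Set (Int × Int) × Int), st.2.1.Nodup →
      ((l.foldl stepA st).2.1).Nodup := by
  induction l with
  | nil => intro st h; simpa
  | cons m rest ih =>
    intro st h
    refine ih _ ?_
    show (stepA st m).2.1.Nodup
    unfold stepA
    simp only [condAdd]
    apply PySem.Set.nodup_add
    exact h

-- ===== VERDICT (by name: the statement is the Claim_ definition above) =====
theorem compute_spec : Claim_equal_compute := by
  intro s _
  show compute s = compute_alt s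
  have h0 : compute s = PySem.Set.len
      (s.toList.foldl stepA ([((0:Int),(0:Int)), (0,0)], [((0:Int),(0:Int))], 0)).2.1 := rfl
  have h1 : compute_alt s = PySem.Set.len
      (walkB s.toList.tail 0 0 (walkB s.toList 0 0 [((0:Int),(0:Int))])) := by
    show PySem.Set.len ((everyOther s.toList.tail).foldl stepB (0, 0,
      ((everyOther s.toList).foldl stepB (0, 0, PySem.Set.ofList [((0:Int),(0:Int))])).2.2)).2.2 = _
    rw [foldB_eq_walkB, foldB_eq_walkB]
    rfl
  rw [h0, h1]
  have hmem : ∀ z, z ∈ (s.toList.foldl stepA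
      ([((0:Int),(0:Int)), (0,0)], [((0:Int),(0:Int))], 0)).2.1 ↔
      z ∈ walkB s.toList.tail 0 0 (walkB s.toList 0 0 [((0:Int),(0:Int))]) := by
    intro z
    rw [foldA_mem, mem_walkB, mem_walkB]
    simp
    tauto
  have hn1 : (s.toList.foldl stepA
      ([((0:Int),(0:Int)), (0,0)], [((0:Int),(0:Int))], 0)).2.1.Nodup :=
    foldA_nodup s.toList _ (by decide)
  have hn2 : (walkB s.toList.tail 0 0 (walkB s.toList 0 0 [((0:Int),(0:Int))])).Nodup :=
    nodup_walkB _ _ _ _ (nodup_walkB _ _ _ _ (by decide))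
  have hperm := (List.perm_ext_iff_of_nodup hn1 hn2).mpr hmem
  unfold PySem.Set.len
  exact_mod_cast hperm.length_eq
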